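-- pv_equiv track=rewrite | github.com/EduardoCarvalho/nltkSegmenter | reportSegmenter.py | tag_stemmed_sents
-- ===== SOURCE A (Python) =====
-- def tag_stemmed_sents(encoded_stemmed_cluster, encoded_stemmed_list):
--     tagged_stemmed_sents = []
--     for i in range(len(encoded_stemmed_cluster)):
--         for j in range(len(encoded_stemmed_cluster[i])):
--             for x in range(len(encoded_stemmed_list)):
--                 if encoded_stemmed_cluster[i][j] in encoded_stemmed_list[x]:
--                     tagged_stemmed_sents.append(tuple([encoded_stemmed_list[x],
--                                                        encoded_stemmed_cluster[i][0]]))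
--     return tagged_stemmed_sents
-- ===== SOURCE B (Python) =====
-- def tag_stemmed_sents(encoded_stemmed_cluster, encoded_stemmed_list):
--     # Memoize, per distinct token, the list of strings that contain it as a
--     # substring, so repeated tokens never rescan encoded_stemmed_list.
--     cache = {}
--     tagged_stemmed_sents = []
--     for row in encoded_stemmed_cluster:
--         if not row:
--             continue
--         head = row[0]
--         for tok in row:
--             hits = cache.get(tok)
--             if hits is None:
--                 hits = [s for s in encoded_stemmed_list if tok in s]
--                 cache[tok] = hits
--             tagged_stemmed_sents += [(s, head) for s in hits]
--     return tagged_stemmed_sents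
-- ===== Notes on version B (the rewrite author's own statement) =====
-- stated objective: alternative
-- what changed: B builds a memo dict mapping each distinct token to the list of strings containing it, computed on first encounter, so repeated tokens reuse the cached scan instead of rescanning encoded_stemmed_list for every (row, token) occurrence; the output-building cost dominates on large inputs, so no overall speed is claimed.
import Mathlib
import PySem

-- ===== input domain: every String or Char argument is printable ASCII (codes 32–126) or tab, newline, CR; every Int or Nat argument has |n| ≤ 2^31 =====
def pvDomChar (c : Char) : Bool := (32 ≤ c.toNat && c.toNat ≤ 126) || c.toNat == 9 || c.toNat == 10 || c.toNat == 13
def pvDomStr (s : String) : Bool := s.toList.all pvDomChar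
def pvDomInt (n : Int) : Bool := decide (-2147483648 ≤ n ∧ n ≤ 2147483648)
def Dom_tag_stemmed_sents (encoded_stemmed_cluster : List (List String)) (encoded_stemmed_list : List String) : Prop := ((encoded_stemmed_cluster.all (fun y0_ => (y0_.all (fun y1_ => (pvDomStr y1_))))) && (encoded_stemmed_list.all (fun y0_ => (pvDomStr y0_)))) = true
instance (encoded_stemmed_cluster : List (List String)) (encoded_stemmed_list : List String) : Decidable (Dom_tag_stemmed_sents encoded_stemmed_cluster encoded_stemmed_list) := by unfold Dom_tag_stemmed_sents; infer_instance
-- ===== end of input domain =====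

-- B memoizes, per distinct token, the list of strings containing it (one dict built on the fly),
-- so repeated tokens never rescan encoded_stemmed_list; same return value as A.

-- ===== PORT A =====
-- triple nested loop: rows, tokens of the row, strings of the list; substring test 'tok in s'
def tag_stemmed_sents (encoded_stemmed_cluster : List (List String)) (encoded_stemmed_list : List String) : List (String × String) :=
  encoded_stemmed_cluster.foldl (fun acc row =>
    row.foldl (fun acc tok =>
      encoded_stemmed_list.foldl (fun acc s =>
        if PySem.Str.isIn tok s then acc ++ [(s, PySem.List.pyGetD row (0 : Int) "")] else acc) acc) acc) []

-- ===== PORT B =====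
-- loop body for one token: consult the cache, on a miss scan the list once and store the result
def pvStepB (lst : List String) (head : String)
    (st : PySem.Dict String (List String) × List (String × String)) (tok : String) :
    PySem.Dict String (List String) × List (String × String) :=
  match st.1.get? tok with
  | some hits => (st.1, st.2 ++ hits.map (fun s => (s, head)))
  | none =>
    let hits := lst.filter (fun s => PySem.Str.isIn tok s)
    (st.1.insert tok hits, st.2 ++ hits.map (fun s => (s, head)))

-- loop body for one row: skip empty rows, else fold the tokens with head = row[0]
def pvRowB (lst : List String)
    (st : PySem.Dict String (List String) × List (String × String)) (row : List String) :
    PySem.Dict String (List String) × List (String × String) :=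
  match row with
  | [] => st
  | head :: _ => row.foldl (pvStepB lst head) st

def tag_stemmed_sents_alt (encoded_stemmed_cluster : List (List String)) (encoded_stemmed_list : List String) : List (String × String) :=
  (encoded_stemmed_cluster.foldl (pvRowB encoded_stemmed_list)
    ((PySem.Dict.empty : PySem.Dict String (List String)), ([] : List (String × String)))).2

-- ===== PRECONDITION & SPEC =====
def Spec_tag_stemmed_sents (encoded_stemmed_cluster : List (List String)) (encoded_stemmed_list : List String) (out : List (String × String)) : Prop := out = tag_stemmed_sents_alt encoded_stemmed_cluster encoded_stemmed_list
instance (encoded_stemmed_cluster : List (List String)) (encoded_stemmed_list : List String) (out : List (String × String)) : Decidable (Spec_tag_stemmed_sents encoded_stemmed_cluster encoded_stemmed_list out) := by unfold Spec_tag_stemmed_sents; infer_instance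

-- ===== CLAIM (what is proved, stated in full; the proofs are below) =====
def Claim_equal_tag_stemmed_sents : Prop := ∀ (encoded_stemmed_cluster : List (List String)) (encoded_stemmed_list : List String), Dom_tag_stemmed_sents encoded_stemmed_cluster encoded_stemmed_list → Spec_tag_stemmed_sents encoded_stemmed_cluster encoded_stemmed_list (tag_stemmed_sents encoded_stemmed_cluster encoded_stemmed_list)

-- ===== LEMMAS AND PROOFS =====

-- the strings of lst containing tok, and the pairs they contribute under head h
def pvHits (lst : List String) (tok : String) : List String :=
  lst.filter (fun s => PySem.Str.isIn tok s)

def pvG (lst : List String) (h tok : String) : List (String × String) :=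
  (pvHits lst tok).map (fun s => (s, h))

-- cache invariant: every stored value is the recomputation
def pvInv (lst : List String) (d : PySem.Dict String (List String)) : Prop :=
  ∀ tok hits, d.get? tok = some hits → hits = pvHits lst tok

lemma pvInv_empty (lst : List String) : pvInv lst PySem.Dict.empty := by
  intro tok hits h; simp [PySem.Dict.get?_empty] at h

lemma pvInv_insert (lst : List String) (d : PySem.Dict String (List String)) (tok : String)
    (hd : pvInv lst d) : pvInv lst (d.insert tok (pvHits lst tok)) := by
  intro t hits h
  by_cases ht : t = tok
  · subst ht; rw [PySem.Dict.get?_insert_self] at h; exact (Option.some.injEq _ _ ▸ h).symm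
  · rw [PySem.Dict.get?_insert_of_ne d (pvHits lst tok) (by simpa using ht)] at h
    exact hd t hits h

lemma pvStepB_some (lst : List String) (head tok : String)
    (st : PySem.Dict String (List String) × List (String × String)) (hits : List String)
    (hc : st.1.get? tok = some hits) :
    pvStepB lst head st tok = (st.1, st.2 ++ hits.map (fun s => (s, head))) := by
  simp [pvStepB, hc]

lemma pvStepB_none (lst : List String) (head tok : String)
    (st : PySem.Dict String (List String) × List (String × String))
    (hc : st.1.get? tok = none) :
    pvStepB lst head st tok = (st.1.insert tok (pvHits lst tok), st.2 ++ pvG lst head tok) := by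
  simp [pvStepB, hc, pvHits, pvG]

lemma pvG_cons (t : List String) (s h tok : String) :
    pvG (s :: t) h tok
      = (if PySem.Str.isIn tok s = true then [(s, h)] else []) ++ pvG t h tok := by
  unfold pvG pvHits
  rw [List.filter_cons]
  cases hs : PySem.Str.isIn tok s <;> simp

-- A's inner loop over the list is acc ++ filtered-map
lemma pvA_inner (lst : List String) (tok h : String) (acc : List (String × String)) :
    lst.foldl (fun acc s => if PySem.Str.isIn tok s then acc ++ [(s, h)] else acc) acc
      = acc ++ pvG lst h tok := by
  induction lst generalizing acc with
  | nil => simp [pvG, pvHits]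
  | cons s t ih =>
    rw [List.foldl_cons, pvG_cons, ih]
    cases hs : PySem.Str.isIn tok s <;> simp

-- A's row loop
lemma pvA_row (lst : List String) (row : List String) (h : String) (acc : List (String × String)) :
    row.foldl (fun acc tok =>
        lst.foldl (fun acc s => if PySem.Str.isIn tok s then acc ++ [(s, h)] else acc) acc) acc
      = acc ++ row.flatMap (fun tok => pvG lst h tok) := by
  induction row generalizing acc with
  | nil => simp
  | cons tok t ih =>
    rw [List.foldl_cons, pvA_inner, ih]
    simp

-- B's row loop: the cache stays valid and the output grows by the same contribution
lemma pvB_row (lst : List String) (row : List String) (head : String)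
    (st : PySem.Dict String (List String) × List (String × String)) (hInv : pvInv lst st.1) :
    ∃ d', row.foldl (pvStepB lst head) st
      = (d', st.2 ++ row.flatMap (fun tok => pvG lst head tok)) ∧ pvInv lst d' := by
  induction row generalizing st with
  | nil => exact ⟨st.1, by simp, hInv⟩
  | cons tok t ih =>
    rw [List.foldl_cons]
    rcases hc : st.1.get? tok with _ | hits
    · rw [pvStepB_none lst head tok st hc]
      obtain ⟨d', hEq, hInv'⟩ := ih (st.1.insert tok (pvHits lst tok), st.2 ++ pvG lst head tok)
        (pvInv_insert lst st.1 tok hInv)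
      refine ⟨d', ?_, hInv'⟩
      rw [hEq]; simp
    · have hh := hInv tok hits hc
      subst hh
      rw [pvStepB_some lst head tok st (pvHits lst tok) hc]
      obtain ⟨d', hEq, hInv'⟩ := ih (st.1, st.2 ++ pvG lst head tok) hInv
      refine ⟨d', ?_, hInv'⟩
      rw [show st.2 ++ (pvHits lst tok).map (fun s => (s, head)) = st.2 ++ pvG lst head tok from rfl, hEq]
      simp

-- per-row contribution shared by both ports
def pvRowOut (lst : List String) (row : List String) : List (String × String) :=
  match row with
  | [] => []
  | head :: _ => row.flatMap (fun tok => pvG lst head tok)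

lemma pvA_cluster (lst : List String) (cl : List (List String)) (acc : List (String × String)) :
    cl.foldl (fun acc row =>
      row.foldl (fun acc tok =>
        lst.foldl (fun acc s =>
          if PySem.Str.isIn tok s then acc ++ [(s, PySem.List.pyGetD row (0 : Int) "")] else acc) acc) acc) acc
      = acc ++ cl.flatMap (fun row => pvRowOut lst row) := by
  induction cl generalizing acc with
  | nil => simp
  | cons row t ih =>
    rw [List.foldl_cons]
    cases row with
    | nil => rw [ih]; simp [pvRowOut]
    | cons head rest =>
      have h0 : PySem.List.pyGetD (head :: rest) (0 : Int) "" = head := by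
        simp [PySem.List.pyGetD, PySem.List.pyGet?, PySem.List.pyIdx?]
      simp only [h0]
      rw [pvA_row lst (head :: rest) head acc, ih]
      simp [pvRowOut]

lemma pvB_cluster (lst : List String) (cl : List (List String))
    (st : PySem.Dict String (List String) × List (String × String)) (hInv : pvInv lst st.1) :
    ∃ d', cl.foldl (pvRowB lst) st
      = (d', st.2 ++ cl.flatMap (fun row => pvRowOut lst row)) ∧ pvInv lst d' := by
  induction cl generalizing st with
  | nil => exact ⟨st.1, by simp, hInv⟩
  | cons row t ih =>
    rw [List.foldl_cons]
    cases row with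
    | nil =>
      obtain ⟨d', hEq, hInv'⟩ := ih st hInv
      refine ⟨d', ?_, hInv'⟩
      rw [show pvRowB lst st [] = st from rfl, hEq]
      simp [pvRowOut]
    | cons head rest =>
      rw [show pvRowB lst st (head :: rest) = (head :: rest).foldl (pvStepB lst head) st from rfl]
      obtain ⟨d1, hEq1, hInv1⟩ := pvB_row lst (head :: rest) head st hInv
      rw [hEq1]
      obtain ⟨d', hEq, hInv'⟩ :=
        ih (d1, st.2 ++ (head :: rest).flatMap (fun tok => pvG lst head tok)) hInv1
      refine ⟨d', ?_, hInv'⟩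
      rw [hEq]
      simp [pvRowOut]

-- ===== VERDICT (by name: the statement is the Claim_ definition above) =====
theorem tag_stemmed_sents_spec : Claim_equal_tag_stemmed_sents := by
  intro cl lst _
  unfold Spec_tag_stemmed_sents tag_stemmed_sents tag_stemmed_sents_alt
  obtain ⟨d', hEq, _⟩ := pvB_cluster lst cl (PySem.Dict.empty, []) (pvInv_empty lst)
  rw [hEq, pvA_cluster]
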